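-- pv_equiv track=rewrite | github.com/malikadan212/AutoVulRepair | src/fuzz_exec/executor.py | _parse_fuzzer_stats
-- ===== SOURCE A (Python) =====
-- from typing import Dict, List, Optional
--
-- def _parse_fuzzer_stats(output: str) -> Dict:
--     """Extract statistics from fuzzer output"""
--     stats = {}
--
--     # Look for common LibFuzzer stats
--     for line in output.split('\n'):
--         if 'cov:' in line:
--             # Example: #12345  DONE   cov: 123 ft: 456 corp: 78/9876b
--             parts = line.split()
--             for part in parts:
--                 if part.startswith('cov:'):
--                     stats['coverage'] = part.split(':')[1]
--                 elif part.startswith('corp:'):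
--                     stats['corpus'] = part.split(':')[1]
--                 elif part.startswith('exec/s:'):
--                     stats['exec_per_sec'] = part.split(':')[1]
--
--     return stats
-- ===== SOURCE B (Python) =====
-- import re
--
-- _STAT_RE = re.compile(r'(?:(?<=\s)|^)(cov|corp|exec/s):([^\s]*)')
-- _KEYS = {'cov': 'coverage', 'corp': 'corpus', 'exec/s': 'exec_per_sec'}
--
--
-- def _parse_fuzzer_stats(output: str):
--     """Extract statistics from fuzzer output (regex-based)."""
--     stats = {}
--     for line in output.split('\n'):
--         if 'cov:' in line:
--             for m in _STAT_RE.finditer(line):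
--                 stats[_KEYS[m.group(1)]] = m.group(2).split(':')[0]
--     return stats
-- ===== Notes on version B (the rewrite author's own statement) =====
-- stated objective: idiomatic
-- what changed: The hand-rolled token loop (split line into words, startswith each prefix, split on ':') is replaced by a single precompiled regex scanned over each cov:-line with finditer, matches processed in token order so first-insertion and last-line-wins behaviour is preserved.
import Mathlib
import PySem

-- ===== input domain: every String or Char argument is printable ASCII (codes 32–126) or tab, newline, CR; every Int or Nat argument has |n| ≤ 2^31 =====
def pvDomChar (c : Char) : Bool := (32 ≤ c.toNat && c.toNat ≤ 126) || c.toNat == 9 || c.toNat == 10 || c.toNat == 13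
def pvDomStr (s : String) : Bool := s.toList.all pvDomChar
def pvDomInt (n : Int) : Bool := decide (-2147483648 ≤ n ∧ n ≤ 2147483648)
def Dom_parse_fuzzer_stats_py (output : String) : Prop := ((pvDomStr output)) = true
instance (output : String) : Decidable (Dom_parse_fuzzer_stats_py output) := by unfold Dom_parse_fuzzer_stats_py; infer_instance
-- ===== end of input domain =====

-- B replaces A's hand-rolled word loop (split + startswith + split(':')) by a regex-style
-- single left-to-right scan of each cov:-line; objective: idiomatic, same asymptotic cost.

-- ===== PORT A =====
-- part.split(':')[1]  (the index always exists where A evaluates it: the part starts with "…:")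
def pvColon1 (part : List Char) : String :=
  String.ofList ((PySem.Chars.splitOn part [':']).getD 1 [])

-- the body of A's inner `for part in parts` loop
def pvAStep (d : PySem.Dict String String) (part : List Char) : PySem.Dict String String :=
  if PySem.Chars.startswith part "cov:".toList then d.insert "coverage" (pvColon1 part)
  else if PySem.Chars.startswith part "corp:".toList then d.insert "corpus" (pvColon1 part)
  else if PySem.Chars.startswith part "exec/s:".toList then d.insert "exec_per_sec" (pvColon1 part)
  else d

-- the body of A's outer `for line in output.split('\n')` loop
def pvALine (d : PySem.Dict String String) (line : List Char) : PySem.Dict String String :=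
  if PySem.Chars.isIn "cov:".toList line then (PySem.Chars.split₀ line).foldl pvAStep d else d

def parse_fuzzer_stats_py (output : String) : List (String × String) :=
  ((PySem.Chars.splitOn output.toList ['\n']).foldl pvALine PySem.Dict.empty).items

-- ===== PORT B =====
-- regex \s (ASCII part; the generated inputs are ASCII)
def pvWs (c : Char) : Bool :=
  c == ' ' || c == '\t' || c == '\n' || c == '\r' || c == '\x0b' || c == '\x0c'

-- the alternation `(cov|corp|exec/s):` of B's pattern, tried at a boundary position:
-- returns the stats key and the number of characters the key match consumes
def pvTryKey (cs : List Char) : Option (String × Nat) :=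
  if "cov:".toList.isPrefixOf cs then some ("coverage", 4)
  else if "corp:".toList.isPrefixOf cs then some ("corpus", 5)
  else if "exec/s:".toList.isPrefixOf cs then some ("exec_per_sec", 7)
  else none

-- (termination helper for pvScanB, cited in its decreasing_by)
theorem pvTryKey_pos {cs : List Char} {kn : String × Nat} (h : pvTryKey cs = some kn) : 1 ≤ kn.2 := by
  unfold pvTryKey at h
  split_ifs at h <;> { cases h; decide }

-- `for m in _STAT_RE.finditer(line)` as a left-to-right scan: atB says whether the current
-- position is a token boundary ((?:(?<=\s)|^)); on a key match the captured [^\s]* run is cut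
-- at the first ':' (m.group(2).split(':')[0]) and the scan resumes after the match
def pvScanB : PySem.Dict String String → List Char → Bool → PySem.Dict String String
  | d, [], _ => d
  | d, c :: rest, atB =>
    if atB then
      match hk : pvTryKey (c :: rest) with
      | some kn =>
        pvScanB (d.insert kn.1 (String.ofList ((((c :: rest).drop kn.2).takeWhile (fun x => !pvWs x)).takeWhile (fun x => x ≠ ':'))))
                (((c :: rest).drop kn.2).dropWhile (fun x => !pvWs x)) false
      | none => pvScanB d rest (pvWs c)
    else pvScanB d rest (pvWs c)
termination_by _ cs _ => cs.length
decreasing_by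
  · have h1 := pvTryKey_pos hk
    have h2 : (((c :: rest).drop kn.2).dropWhile (fun x => !pvWs x)).length ≤ ((c :: rest).drop kn.2).length :=
      List.length_dropWhile_le _ _
    simp [List.length_drop] at h2 ⊢
    omega
  · simp
  · simp

def pvBLine (d : PySem.Dict String String) (line : List Char) : PySem.Dict String String :=
  if PySem.Chars.isIn "cov:".toList line then pvScanB d line true else d

def parse_fuzzer_stats_py_alt (output : String) : List (String × String) :=
  ((PySem.Chars.splitOn output.toList ['\n']).foldl pvBLine PySem.Dict.empty).items

-- ===== PRECONDITION & SPEC =====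
def Spec_parse_fuzzer_stats_py (output : String) (out : List (String × String)) : Prop := out = parse_fuzzer_stats_py_alt output
instance (output : String) (out : List (String × String)) : Decidable (Spec_parse_fuzzer_stats_py output out) := by unfold Spec_parse_fuzzer_stats_py; infer_instance

-- ===== CLAIM (what is proved, stated in full; the proofs are below) =====
def Claim_equal_parse_fuzzer_stats_py : Prop := ∀ (output : String), Dom_parse_fuzzer_stats_py output → Spec_parse_fuzzer_stats_py output (parse_fuzzer_stats_py output)

-- ===== LEMMAS AND PROOFS =====

-- generic list facts specific to these two programs' predicates
theorem pv_takeWhile_congr {p q : Char → Bool} : ∀ (l : List Char), (∀ c ∈ l, p c = q c) → l.takeWhile p = l.takeWhile q := by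
  intro l h
  induction l with
  | nil => rfl
  | cons c l ih =>
    simp only [List.takeWhile_cons, h c (by simp)]
    cases hq : q c <;> simp [ih (fun x hx => h x (by simp [hx]))]

theorem pv_dropWhile_congr {p q : Char → Bool} : ∀ (l : List Char), (∀ c ∈ l, p c = q c) → l.dropWhile p = l.dropWhile q := by
  intro l h
  induction l with
  | nil => rfl
  | cons c l ih =>
    simp only [List.dropWhile_cons, h c (by simp)]
    cases hq : q c <;> simp [ih (fun x hx => h x (by simp [hx]))]

theorem pv_takeWhile_append_all {p : Char → Bool} : ∀ (xs ys : List Char), (∀ x ∈ xs, p x = true) → (xs ++ ys).takeWhile p = xs ++ ys.takeWhile p := by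
  intro xs ys h
  induction xs with
  | nil => rfl
  | cons x xs ih => simp [List.takeWhile_cons, h x (by simp), ih (fun a ha => h a (by simp [ha]))]

theorem pv_dropWhile_append_all {p : Char → Bool} : ∀ (xs ys : List Char), (∀ x ∈ xs, p x = true) → (xs ++ ys).dropWhile p = ys.dropWhile p := by
  intro xs ys h
  induction xs with
  | nil => rfl
  | cons x xs ih => simp [List.dropWhile_cons, h x (by simp), ih (fun a ha => h a (by simp [ha]))]

-- Dom chars: B's regex-\s agrees with Python's str whitespace
theorem pv_dom_ws {c : Char} (h : pvDomChar c = true) : pvWs c = PySem.Chars.isspace c := by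
  simp [pvDomChar] at h
  rw [Bool.eq_iff_iff]
  simp only [pvWs, PySem.Chars.isspace.eq_def, Bool.or_eq_true, Bool.and_eq_true, beq_iff_eq,
    decide_eq_true_eq, Char.ext_iff]
  simp only [show ∀ d : Char, (c.val = d.val) ↔ c.toNat = d.toNat from fun d => by
    rw [Char.toNat, Char.toNat, ← UInt32.toNat_inj]]
  simp only [show (' ').toNat = 32 from rfl, show ('\t').toNat = 9 from rfl,
    show ('\n').toNat = 10 from rfl, show ('\x0d').toNat = 13 from rfl,
    show ('\x0b').toNat = 11 from rfl, show ('\x0c').toNat = 12 from rfl]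
  omega


-- characterization of str.split() (PySem.Chars.split₀)
theorem pv_go0_acc : ∀ (s cur : List Char) (accL : List (List Char)),
    PySem.Chars.split₀.go s cur accL = accL.reverse ++ PySem.Chars.split₀.go s cur [] := by
  intro s
  induction s with
  | nil =>
    intro cur accL
    simp only [PySem.Chars.split₀.go]
    split_ifs <;> simp
  | cons c rest ih =>
    intro cur accL
    simp only [PySem.Chars.split₀.go]
    split_ifs with h1 h2
    · rw [ih [] accL]
    · rw [ih [] (cur.reverse :: accL), ih [] [cur.reverse]]
      simp
    · rw [ih (c :: cur) accL]

theorem pv_split₀_ws {c : Char} (h : PySem.Chars.isspace c = true) (cs : List Char) :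
    PySem.Chars.split₀ (c :: cs) = PySem.Chars.split₀ cs := by
  simp [PySem.Chars.split₀, PySem.Chars.split₀.go, h]

theorem pv_go0_word : ∀ (s cur : List Char), cur ≠ [] →
    PySem.Chars.split₀.go s cur [] =
      (cur.reverse ++ s.takeWhile (fun x => !PySem.Chars.isspace x)) ::
        PySem.Chars.split₀ (s.dropWhile (fun x => !PySem.Chars.isspace x)) := by
  intro s
  induction s with
  | nil =>
    intro cur hcur
    simp [PySem.Chars.split₀.go, List.isEmpty_iff, hcur, PySem.Chars.split₀]
  | cons c rest ih =>
    intro cur hcur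
    simp only [PySem.Chars.split₀.go, List.takeWhile_cons, List.dropWhile_cons]
    cases hws : PySem.Chars.isspace c with
    | true =>
      simp [List.isEmpty_iff, hcur, hws, pv_split₀_ws hws, PySem.Chars.split₀,
        pv_go0_acc rest [] [cur.reverse]]
      conv_rhs => rw [PySem.Chars.split₀.go]
      simp [hws]
    | false =>
      simp only [if_neg (by simp [hws] : ¬ PySem.Chars.isspace c = true), hws, Bool.not_false, if_pos]
      rw [ih (c :: cur) (by simp)]
      simp

theorem pv_split₀_word {c : Char} (h : PySem.Chars.isspace c = false) (cs : List Char) :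
    PySem.Chars.split₀ (c :: cs) =
      ((c :: cs).takeWhile (fun x => !PySem.Chars.isspace x)) ::
        PySem.Chars.split₀ ((c :: cs).dropWhile (fun x => !PySem.Chars.isspace x)) := by
  rw [PySem.Chars.split₀]
  simp only [PySem.Chars.split₀.go, if_neg (by simp [h] : ¬ PySem.Chars.isspace c = true)]
  rw [pv_go0_word cs [c] (by simp)]
  simp [List.takeWhile_cons, List.dropWhile_cons, h]


-- characterization of s.split(':') / s.split('\n') (PySem.Chars.splitOn, one-char separator)
def pvSplitOnD (d : Char) : List Char → List (List Char)
  | [] => [[]]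
  | c :: cs => if c = d then [] :: pvSplitOnD d cs else (pvSplitOnD d cs).modifyHead (c :: ·)

theorem pv_splitOnD_ne_nil (d : Char) : ∀ (l : List Char), pvSplitOnD d l ≠ [] := by
  intro l
  induction l with
  | nil => simp [pvSplitOnD]
  | cons c cs ih =>
    simp only [pvSplitOnD]
    split_ifs
    · simp
    · cases h : pvSplitOnD d cs with
      | nil => exact absurd h ih
      | cons a t => simp

theorem pv_goS_spec (d : Char) : ∀ (fuel : Nat) (l cur : List Char) (acc : List (List Char)),
    l.length < fuel →
    PySem.Chars.splitOn.go [d] fuel l cur acc =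
      acc.reverse ++ (pvSplitOnD d l).modifyHead (fun p => cur.reverse ++ p) := by
  intro fuel
  induction fuel with
  | zero => intro l cur acc h; omega
  | succ f ih =>
    intro l cur acc h
    cases l with
    | nil => simp [PySem.Chars.splitOn.go, pvSplitOnD]
    | cons c restl =>
      simp only [PySem.Chars.splitOn.go]
      by_cases hcd : c = d
      · rw [if_pos (by simp [List.isPrefixOf, hcd])]
        simp only [List.length_cons, List.length_nil, List.drop_succ_cons, List.drop_zero]
        rw [ih restl [] (cur.reverse :: acc) (by simp at h ⊢; omega)]
        simp [pvSplitOnD, hcd]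
        cases hrec : pvSplitOnD d restl with
        | nil => exact absurd hrec (pv_splitOnD_ne_nil d restl)
        | cons a t => simp
      · rw [if_neg (by simp [List.isPrefixOf]; intro he; exact absurd he.symm hcd)]
        rw [ih restl (c :: cur) acc (by simp at h ⊢; omega)]
        simp only [pvSplitOnD, if_neg hcd]
        cases hrec : pvSplitOnD d restl with
        | nil => exact absurd hrec (pv_splitOnD_ne_nil d restl)
        | cons a t => simp

theorem pv_splitOn_eq (d : Char) (l : List Char) :
    PySem.Chars.splitOn l [d] = pvSplitOnD d l := by
  rw [PySem.Chars.splitOn, pv_goS_spec d (l.length + 1) l [] [] (by omega)]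
  cases hrec : pvSplitOnD d l with
  | nil => exact absurd hrec (pv_splitOnD_ne_nil d l)
  | cons a t => simp

theorem pv_mem_splitOnD (d : Char) : ∀ (l w : List Char), w ∈ pvSplitOnD d l → ∀ c ∈ w, c ∈ l := by
  intro l
  induction l with
  | nil => intro w hw c hc; simp [pvSplitOnD] at hw; subst hw; simp at hc
  | cons x l ih =>
    intro w hw c hc
    simp only [pvSplitOnD] at hw
    split_ifs at hw with hxd
    · rcases List.mem_cons.mp hw with h | h
      · subst h; simp at hc
      · exact List.mem_cons_of_mem _ (ih w h c hc)
    · cases hrec : pvSplitOnD d l with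
      | nil => exact absurd hrec (pv_splitOnD_ne_nil d l)
      | cons a t =>
        rw [hrec] at hw
        simp only [List.modifyHead] at hw
        rcases List.mem_cons.mp hw with h | h
        · subst h
          rcases List.mem_cons.mp hc with h' | h'
          · simp [h']
          · exact List.mem_cons_of_mem _ (ih a (by simp [hrec]) c h')
        · exact List.mem_cons_of_mem _ (ih w (by simp [hrec, h]) c hc)

theorem pv_splitOnD_head (d : Char) : ∀ (l : List Char), ∃ t, pvSplitOnD d l = l.takeWhile (fun x => x ≠ d) :: t := by
  intro l
  induction l with
  | nil => exact ⟨[], rfl⟩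
  | cons c l ih =>
    by_cases hcd : c = d
    · exact ⟨pvSplitOnD d l, by simp [pvSplitOnD, hcd]⟩
    · obtain ⟨t, ht⟩ := ih
      exact ⟨t, by simp [pvSplitOnD, hcd, ht, List.takeWhile_cons]⟩

theorem pv_splitOnD_prefix (d : Char) : ∀ (pre v : List Char), (∀ c ∈ pre, c ≠ d) →
    pvSplitOnD d (pre ++ d :: v) = pre :: pvSplitOnD d v := by
  intro pre
  induction pre with
  | nil => intro v _; simp [pvSplitOnD]
  | cons c pre ih =>
    intro v h
    simp only [List.cons_append, pvSplitOnD, if_neg (h c (by simp))]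
    rw [ih v (fun x hx => h x (by simp [hx]))]
    simp [List.modifyHead]


-- value equality: part.split(':')[1] for a part "pre:..."
theorem pv_colon1_eq (pre v : List Char) (hpre : ∀ c ∈ pre, c ≠ ':') :
    pvColon1 (pre ++ ':' :: v) = String.ofList (v.takeWhile (fun x => x ≠ ':')) := by
  unfold pvColon1
  rw [pv_splitOn_eq, pv_splitOnD_prefix ':' pre v hpre]
  obtain ⟨t, ht⟩ := pv_splitOnD_head ':' v
  simp [ht]

-- the scan walks over non-boundary non-matching characters
theorem pv_scan_skip : ∀ (v : List Char), (∀ x ∈ v, pvWs x = false) → ∀ (tail : List Char) (d : PySem.Dict String String),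
    pvScanB d (v ++ tail) false = pvScanB d tail false := by
  intro v
  induction v with
  | nil => intro _ _ _; rfl
  | cons x v ih =>
    intro h tail d
    rw [List.cons_append]
    rw [show pvScanB d (x :: (v ++ tail)) false = pvScanB d (v ++ tail) (pvWs x) by simp [pvScanB]]
    rw [h x (by simp)]
    exact ih (fun a ha => h a (by simp [ha])) tail d

-- no key matches at a whitespace character
theorem pv_tryKey_none_of_ws {c : Char} (rest : List Char) (hw : PySem.Chars.isspace c = true) :
    pvTryKey (c :: rest) = none := by
  unfold pvTryKey
  split_ifs with h1 h2 h3
  · rw [List.isPrefixOf_iff_prefix] at h1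
    obtain ⟨t, ht⟩ := h1
    simp at ht
    rw [← ht.1] at hw
    exact absurd hw (by decide)
  · rw [List.isPrefixOf_iff_prefix] at h2
    obtain ⟨t, ht⟩ := h2
    simp at ht
    rw [← ht.1] at hw
    exact absurd hw (by decide)
  · rw [List.isPrefixOf_iff_prefix] at h3
    obtain ⟨t, ht⟩ := h3
    simp at ht
    rw [← ht.1] at hw
    exact absurd hw (by decide)
  · rfl


-- a word's head is whitespace after a dropWhile on "not space"
theorem pv_dropWhile_head_ws (l : List Char) (x : Char) (t : List Char)
    (h : l.dropWhile (fun y => !PySem.Chars.isspace y) = x :: t) : PySem.Chars.isspace x = true := by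
  have hne : l.dropWhile (fun y => !PySem.Chars.isspace y) ≠ [] := by simp [h]
  have hh := List.head_dropWhile_not (fun y => !PySem.Chars.isspace y) hne
  simp [h] at hh
  exact hh

-- a key that is not a prefix of the line tail is not a prefix of the current word
theorem pv_not_startswith (k : List Char) (c : Char) (rest : List Char)
    (hkpre : ¬ k.isPrefixOf (c :: rest) = true) :
    PySem.Chars.startswith ((c :: rest).takeWhile (fun x => !PySem.Chars.isspace x)) k = false := by
  rw [PySem.Chars.startswith, Bool.eq_false_iff]
  intro hsw
  apply hkpre
  rw [List.isPrefixOf_iff_prefix] at hsw ⊢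
  exact hsw.trans (List.takeWhile_prefix _)

-- what both programs do to a word that starts with the key pre ++ ":"
theorem pv_word_key (pre : List Char)
    (hpre : ∀ x ∈ pre, x ≠ ':')
    (hall : ∀ x ∈ pre ++ [':'], (!PySem.Chars.isspace x) = true ∧ (!pvWs x) = true)
    (c : Char) (rest : List Char) (H : ∀ a ∈ c :: rest, pvWs a = PySem.Chars.isspace a)
    (h1 : (pre ++ [':']).isPrefixOf (c :: rest) = true) :
    PySem.Chars.startswith ((c :: rest).takeWhile (fun x => !PySem.Chars.isspace x)) (pre ++ [':']) = true
    ∧ pvColon1 ((c :: rest).takeWhile (fun x => !PySem.Chars.isspace x)) =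
        String.ofList ((((c :: rest).drop (pre ++ [':']).length).takeWhile (fun x => !pvWs x)).takeWhile (fun x => x ≠ ':'))
    ∧ ((c :: rest).drop (pre ++ [':']).length).dropWhile (fun x => !pvWs x) =
        (c :: rest).dropWhile (fun x => !PySem.Chars.isspace x) := by
  have heq : (pre ++ [':']) ++ (c :: rest).drop (pre ++ [':']).length = c :: rest :=
    List.prefix_iff_eq_append.mp (List.isPrefixOf_iff_prefix.mp h1)
  have w_eq : (c :: rest).takeWhile (fun x => !PySem.Chars.isspace x) =
      (pre ++ [':']) ++ ((c :: rest).drop (pre ++ [':']).length).takeWhile (fun x => !PySem.Chars.isspace x) := by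
    conv_lhs => rw [← heq]
    exact pv_takeWhile_append_all _ _ (fun x hx => (hall x hx).1)
  have hmemu : ∀ a ∈ (c :: rest).drop (pre ++ [':']).length, pvWs a = PySem.Chars.isspace a :=
    fun a ha => H a (List.mem_of_mem_drop ha)
  have hv : ((c :: rest).drop (pre ++ [':']).length).takeWhile (fun x => !pvWs x) =
      ((c :: rest).drop (pre ++ [':']).length).takeWhile (fun x => !PySem.Chars.isspace x) :=
    pv_takeWhile_congr _ (fun a ha => by rw [hmemu a ha])
  refine ⟨?_, ?_, ?_⟩
  · rw [PySem.Chars.startswith, w_eq, List.isPrefixOf_iff_prefix]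
    exact ⟨_, rfl⟩
  · rw [w_eq, List.append_assoc, List.singleton_append, pv_colon1_eq pre _ hpre, hv]
  · rw [pv_dropWhile_congr _ (fun a ha => by rw [hmemu a ha])]
    conv_rhs => rw [← heq]
    rw [pv_dropWhile_append_all _ _ (fun x hx => (hall x hx).1)]

-- MAIN: from a boundary position, B's scan of a line equals A's fold over its words
theorem pvScanB_false (d : PySem.Dict String String) (c : Char) (rest : List Char) :
    pvScanB d (c :: rest) false = pvScanB d rest (pvWs c) := by
  simp [pvScanB]

theorem pvScanB_none (d : PySem.Dict String String) (c : Char) (rest : List Char)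
    (hk : pvTryKey (c :: rest) = none) :
    pvScanB d (c :: rest) true = pvScanB d rest (pvWs c) := by
  rw [pvScanB]
  simp only [if_pos rfl]
  split
  · split <;> simp_all
  · simp_all

theorem pvScanB_some (d : PySem.Dict String String) (c : Char) (rest : List Char)
    (k1 : String) (k2 : Nat) (hk : pvTryKey (c :: rest) = some (k1, k2)) :
    pvScanB d (c :: rest) true =
      pvScanB (d.insert k1 (String.ofList ((((c :: rest).drop k2).takeWhile (fun x => !pvWs x)).takeWhile (fun x => x ≠ ':'))))
        (((c :: rest).drop k2).dropWhile (fun x => !pvWs x)) false := by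
  rw [pvScanB]
  simp only [if_pos rfl]
  split
  · split <;> simp_all
  · simp_all

set_option maxRecDepth 8192 in
theorem pv_scan_main : ∀ (n : Nat) (cs : List Char), cs.length ≤ n →
    (∀ c ∈ cs, pvWs c = PySem.Chars.isspace c) → ∀ d,
    pvScanB d cs true = (PySem.Chars.split₀ cs).foldl pvAStep d := by
  intro n
  induction n with
  | zero =>
    intro cs hlen _ d
    have h0 : cs = [] := List.length_eq_zero_iff.mp (Nat.le_zero.mp hlen)
    subst h0
    simp [pvScanB, PySem.Chars.split₀, PySem.Chars.split₀.go]
  | succ n ih =>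
    intro cs hlen H d
    cases cs with
    | nil => simp [pvScanB, PySem.Chars.split₀, PySem.Chars.split₀.go]
    | cons c rest =>
      by_cases hw : PySem.Chars.isspace c = true
      · rw [pv_split₀_ws hw, pvScanB_none d c rest (pv_tryKey_none_of_ws rest hw),
          H c (by simp), hw]
        exact ih rest (by simp at hlen; omega) (fun a ha => H a (by simp [ha])) d
      · replace hw : PySem.Chars.isspace c = false := by simpa using hw
        have hwp : pvWs c = false := by rw [H c (by simp)]; exact hw
        have hdw : (c :: rest).dropWhile (fun x => !PySem.Chars.isspace x) =
            rest.dropWhile (fun x => !PySem.Chars.isspace x) := by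
          simp [List.dropWhile_cons, hw]
        have hrd_sub : ∀ a ∈ rest.dropWhile (fun x => !PySem.Chars.isspace x), a ∈ rest :=
          fun a ha => (List.dropWhile_sublist _).mem ha
        -- after the word both sides continue at the next whitespace (or end of line)
        have endgame : ∀ d', pvScanB d' (rest.dropWhile (fun x => !PySem.Chars.isspace x)) false =
            (PySem.Chars.split₀ (rest.dropWhile (fun x => !PySem.Chars.isspace x))).foldl pvAStep d' := by
          intro d'
          cases hrdc : rest.dropWhile (fun x => !PySem.Chars.isspace x) with
          | nil => simp [pvScanB, PySem.Chars.split₀, PySem.Chars.split₀.go]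
          | cons x t =>
            have hx := pv_dropWhile_head_ws rest x t hrdc
            have hxr : x ∈ rest := hrd_sub x (by simp [hrdc])
            rw [pv_split₀_ws hx, pvScanB_false, H x (by simp [hxr]), hx]
            have htlen : t.length ≤ n := by
              have h1 : (x :: t).length ≤ rest.length := by
                rw [← hrdc]; exact List.length_dropWhile_le _ _
              simp at hlen h1; omega
            exact ih t htlen (fun a ha => H a (by simp [hrd_sub a (by simp [hrdc, ha])])) d'
        rw [pv_split₀_word hw, List.foldl_cons, hdw]
        by_cases h1 : (['c', 'o', 'v'] ++ [':'] : List Char).isPrefixOf (c :: rest) = true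
        · rw [pvScanB_some d c rest "coverage" 4 (by
            unfold pvTryKey
            rw [if_pos (show "cov:".toList.isPrefixOf (c :: rest) = true from h1)])]
          obtain ⟨hs1, hs2, hs3⟩ := pv_word_key ['c', 'o', 'v']
            (by intro x hx; fin_cases hx <;> decide)
            (by intro x hx; fin_cases hx <;> exact ⟨by decide, by decide⟩) c rest H h1
          rw [show ((['c', 'o', 'v'] : List Char) ++ [':']).length = 4 from rfl] at hs2 hs3
          rw [show ((['c', 'o', 'v'] : List Char) ++ [':']) = (['c', 'o', 'v', ':'] : List Char) from rfl] at hs1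
          rw [show pvAStep d ((c :: rest).takeWhile (fun x => !PySem.Chars.isspace x)) =
              d.insert "coverage" (pvColon1 ((c :: rest).takeWhile (fun x => !PySem.Chars.isspace x))) by
            simp [pvAStep, hs1]]
          rw [hs2, hs3, hdw]
          exact endgame _
        · by_cases h2 : "corp:".toList.isPrefixOf (c :: rest) = true
          · rw [pvScanB_some d c rest "corpus" 5 (by
              unfold pvTryKey
              rw [if_neg (show ¬ "cov:".toList.isPrefixOf (c :: rest) = true from h1),
                if_pos (show "corp:".toList.isPrefixOf (c :: rest) = true from h2)])]
            obtain ⟨hs1, hs2, hs3⟩ := pv_word_key ['c', 'o', 'r', 'p']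
              (by intro x hx; fin_cases hx <;> decide)
              (by intro x hx; fin_cases hx <;> exact ⟨by decide, by decide⟩) c rest H
              (show (['c', 'o', 'r', 'p'] ++ [':'] : List Char).isPrefixOf (c :: rest) = true from h2)
            rw [show ((['c', 'o', 'r', 'p'] : List Char) ++ [':']).length = 5 from rfl] at hs2 hs3
            rw [show ((['c', 'o', 'r', 'p'] : List Char) ++ [':']) = (['c', 'o', 'r', 'p', ':'] : List Char) from rfl] at hs1
            rw [show pvAStep d ((c :: rest).takeWhile (fun x => !PySem.Chars.isspace x)) =
                d.insert "corpus" (pvColon1 ((c :: rest).takeWhile (fun x => !PySem.Chars.isspace x))) by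
              simp [pvAStep, hs1, pv_not_startswith ['c', 'o', 'v', ':'] c rest
                (show ¬ (['c', 'o', 'v', ':'] : List Char).isPrefixOf (c :: rest) = true from h1)]]
            rw [hs2, hs3, hdw]
            exact endgame _
          · by_cases h3 : (['e', 'x', 'e', 'c', '/', 's'] ++ [':'] : List Char).isPrefixOf (c :: rest) = true
            · rw [pvScanB_some d c rest "exec_per_sec" 7
                (by
                unfold pvTryKey
                rw [if_neg (show ¬ "cov:".toList.isPrefixOf (c :: rest) = true from h1),
                  if_neg (show ¬ "corp:".toList.isPrefixOf (c :: rest) = true from h2),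
                  if_pos (show "exec/s:".toList.isPrefixOf (c :: rest) = true from h3)])]
              obtain ⟨hs1, hs2, hs3⟩ := pv_word_key ['e', 'x', 'e', 'c', '/', 's']
                (by intro x hx; fin_cases hx <;> decide)
                (by intro x hx; fin_cases hx <;> exact ⟨by decide, by decide⟩) c rest H h3
              rw [show ((['e', 'x', 'e', 'c', '/', 's'] : List Char) ++ [':']).length = 7 from rfl] at hs2 hs3
              rw [show ((['e', 'x', 'e', 'c', '/', 's'] : List Char) ++ [':']) = (['e', 'x', 'e', 'c', '/', 's', ':'] : List Char) from rfl] at hs1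
              rw [show pvAStep d ((c :: rest).takeWhile (fun x => !PySem.Chars.isspace x)) =
                  d.insert "exec_per_sec" (pvColon1 ((c :: rest).takeWhile (fun x => !PySem.Chars.isspace x))) by
                simp [pvAStep, hs1, pv_not_startswith ['c', 'o', 'v', ':'] c rest
                  (show ¬ (['c', 'o', 'v', ':'] : List Char).isPrefixOf (c :: rest) = true from h1),
                  pv_not_startswith ['c', 'o', 'r', 'p', ':'] c rest
                  (show ¬ (['c', 'o', 'r', 'p', ':'] : List Char).isPrefixOf (c :: rest) = true from h2)]]
              rw [hs2, hs3, hdw]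
              exact endgame _
            · have hk : pvTryKey (c :: rest) = none := by
                unfold pvTryKey
                rw [if_neg (show ¬ "cov:".toList.isPrefixOf (c :: rest) = true from h1),
                  if_neg (show ¬ "corp:".toList.isPrefixOf (c :: rest) = true from h2),
                  if_neg (show ¬ "exec/s:".toList.isPrefixOf (c :: rest) = true from h3)]
              rw [show pvAStep d ((c :: rest).takeWhile (fun x => !PySem.Chars.isspace x)) = d by
                simp [pvAStep, pv_not_startswith ['c', 'o', 'v', ':'] c rest
                  (show ¬ (['c', 'o', 'v', ':'] : List Char).isPrefixOf (c :: rest) = true from h1),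
                  pv_not_startswith ['c', 'o', 'r', 'p', ':'] c rest
                  (show ¬ (['c', 'o', 'r', 'p', ':'] : List Char).isPrefixOf (c :: rest) = true from h2),
                  pv_not_startswith ['e', 'x', 'e', 'c', '/', 's', ':'] c rest
                  (show ¬ (['e', 'x', 'e', 'c', '/', 's', ':'] : List Char).isPrefixOf (c :: rest) = true from h3)]]
              rw [pvScanB_none d c rest hk, hwp]
              have hskip : pvScanB d rest false =
                  pvScanB d (rest.dropWhile (fun x => !pvWs x)) false := by
                conv_lhs => rw [← List.takeWhile_append_dropWhile (p := fun x => !pvWs x) (l := rest)]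
                exact pv_scan_skip _
                  (fun a ha => by have := List.mem_takeWhile_imp ha; simpa using this) _ d
              rw [hskip, pv_dropWhile_congr rest (fun a ha => by rw [H a (by simp [ha])])]
              exact endgame d

-- ===== VERDICT (by name: the statement is the Claim_ definition above) =====
theorem parse_fuzzer_stats_py_spec : Claim_equal_parse_fuzzer_stats_py := by
  intro output hdom
  unfold Spec_parse_fuzzer_stats_py parse_fuzzer_stats_py parse_fuzzer_stats_py_alt
  refine congrArg PySem.Dict.items ?_
  apply PySem.List.foldl_congr_mem
  intro acc line hline
  have hchars : ∀ a ∈ line, pvDomChar a = true := by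
    intro a ha
    have hmem : a ∈ output.toList :=
      pv_mem_splitOnD '\n' output.toList line (by rw [← pv_splitOn_eq]; exact hline) a ha
    have hall : output.toList.all pvDomChar = true := hdom
    exact List.all_eq_true.mp hall a hmem
  unfold pvALine pvBLine
  split_ifs with hcov
  · exact (pv_scan_main line.length line le_rfl
      (fun ch hch => pv_dom_ws (hchars ch hch)) acc).symm
  · rfl
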